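-- pv_equiv track=rewrite | github.com/TincyThomas/301-Days-of-Problem-Solving | Three Lists!.py | sum_common
-- ===== SOURCE A (Python) =====
-- def sum_common(lst1, lst2, lst3):
-- 	a = []
-- 	b = []
-- 	z = 0
-- 	for i in lst1:
-- 		for j in lst2:
-- 			if i == j:
-- 				a = a+[i]
-- 	for k in a:
-- 		for l in lst3:
-- 			if k == l:
-- 				b = b+[k]
-- 	for q in b:
-- 		z = z+q
-- 	return z
-- ===== SOURCE B (Python) =====
-- def sum_common(lst1, lst2, lst3):
--     c2 = {}
--     for x in lst2:
--         c2[x] = c2.get(x, 0) + 1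
--     c3 = {}
--     for x in lst3:
--         c3[x] = c3.get(x, 0) + 1
--     z = 0
--     for i in lst1:
--         z = z + i * c2.get(i, 0) * c3.get(i, 0)
--     return z
-- ===== Notes on version B (the rewrite author's own statement) =====
-- stated objective: faster
-- what changed: Replaces A's nested quadratic rescans and intermediate match-lists by two hash-count passes over lst2/lst3 and one accumulation pass over lst1 summing i*count2(i)*count3(i).
import Mathlib
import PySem

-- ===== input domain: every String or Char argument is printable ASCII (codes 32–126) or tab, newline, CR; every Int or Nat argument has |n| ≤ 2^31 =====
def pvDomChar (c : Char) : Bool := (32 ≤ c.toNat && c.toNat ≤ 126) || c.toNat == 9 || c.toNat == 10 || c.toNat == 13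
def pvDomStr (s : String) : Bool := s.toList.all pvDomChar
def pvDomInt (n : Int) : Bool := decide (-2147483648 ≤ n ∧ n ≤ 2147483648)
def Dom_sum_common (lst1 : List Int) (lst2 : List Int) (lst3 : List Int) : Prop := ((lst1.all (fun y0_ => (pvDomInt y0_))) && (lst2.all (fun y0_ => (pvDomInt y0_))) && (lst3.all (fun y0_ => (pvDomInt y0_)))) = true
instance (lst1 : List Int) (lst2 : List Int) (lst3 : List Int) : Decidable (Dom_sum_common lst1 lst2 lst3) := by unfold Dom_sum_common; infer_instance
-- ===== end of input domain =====

-- B replaces A's nested quadratic rescans by two count dictionaries and one linear pass (faster).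

-- ===== PORT A =====
def sum_common (lst1 : List Int) (lst2 : List Int) (lst3 : List Int) : Int :=
  let a := lst1.foldl (fun a i => lst2.foldl (fun a j => if i == j then a ++ [i] else a) a) []
  let b := a.foldl (fun b k => lst3.foldl (fun b l => if k == l then b ++ [k] else b) b) []
  b.foldl (fun z q => z + q) 0

-- ===== PORT B =====
def sum_common_alt (lst1 : List Int) (lst2 : List Int) (lst3 : List Int) : Int :=
  let c2 := lst2.foldl (fun d x => d.insert x (d.getD x 0 + 1)) (PySem.Dict.empty : PySem.Dict Int Int)
  let c3 := lst3.foldl (fun d x => d.insert x (d.getD x 0 + 1)) (PySem.Dict.empty : PySem.Dict Int Int)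
  lst1.foldl (fun z i => z + i * c2.getD i 0 * c3.getD i 0) 0

-- ===== PRECONDITION & SPEC =====
def Spec_sum_common (lst1 : List Int) (lst2 : List Int) (lst3 : List Int) (out : Int) : Prop := out = sum_common_alt lst1 lst2 lst3
instance (lst1 : List Int) (lst2 : List Int) (lst3 : List Int) (out : Int) : Decidable (Spec_sum_common lst1 lst2 lst3 out) := by unfold Spec_sum_common; infer_instance

-- ===== CLAIM (what is proved, stated in full; the proofs are below) =====
def Claim_equal_sum_common : Prop := ∀ (lst1 : List Int) (lst2 : List Int) (lst3 : List Int), Dom_sum_common lst1 lst2 lst3 → Spec_sum_common lst1 lst2 lst3 (sum_common lst1 lst2 lst3)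

-- ===== LEMMAS AND PROOFS =====

-- foldl with (+) sums the list on top of the accumulator
theorem foldl_plus (l : List Int) (z : Int) :
    l.foldl (fun z q => z + q) z = z + l.sum := by
  induction l generalizing z with
  | nil => simp
  | cons q t ih => simp [ih]; ring

-- folding z + f i over a list sums the mapped list
theorem foldl_addf (f : Int → Int) (l : List Int) (z : Int) :
    l.foldl (fun z i => z + f i) z = z + (l.map f).sum := by
  induction l generalizing z with
  | nil => simp
  | cons i t ih => simp [ih]; ring

-- A's inner scan of `ls` appending `i` at each match produces a run of `i` of length `ls.count i`.
theorem inner_match_run (i : Int) (ls : List Int) (acc : List Int) :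
    ls.foldl (fun a j => if i == j then a ++ [i] else a) acc
      = acc ++ List.replicate (ls.count i) i := by
  rw [PySem.List.foldl_append_if (fun j => i == j) (fun _ => i)]
  congr 1
  rw [List.map_const']
  congr 1
  induction ls with
  | nil => simp
  | cons j t ih =>
      by_cases h : i = j
      · subst h; simp [ih]
      · simp [h, Ne.symm h, ih]

-- sum of A's b-loop over an arbitrary source list
theorem b_loop_sum (src ls : List Int) (acc : List Int) :
    ((src.foldl (fun b k => ls.foldl (fun b l => if k == l then b ++ [k] else b) b) acc).foldl
        (fun z q => z + q) 0)
      = (acc.foldl (fun z q => z + q) 0) + (src.map (fun k => (ls.count k : Int) * k)).sum := by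
  induction src generalizing acc with
  | nil => simp
  | cons k tl ih =>
      simp only [List.foldl_cons, List.map_cons, List.sum_cons]
      rw [ih, inner_match_run]
      rw [foldl_plus, foldl_plus]
      simp [List.sum_replicate, mul_comm]
      ring

-- sum of g over A's a-loop output
theorem a_map_sum (lst2 : List Int) (g : Int → Int) (l1 : List Int) (acc : List Int) :
    ((l1.foldl (fun a i => lst2.foldl (fun a j => if i == j then a ++ [i] else a) a) acc).map g).sum
      = (acc.map g).sum + (l1.map (fun i => (lst2.count i : Int) * g i)).sum := by
  induction l1 generalizing acc with
  | nil => simp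
  | cons i tl ih =>
      simp only [List.foldl_cons, List.map_cons, List.sum_cons]
      rw [inner_match_run, ih]
      simp [List.sum_replicate, mul_comm]
      ring

-- ===== VERDICT (by name: the statement is the Claim_ definition above) =====
theorem sum_common_spec : Claim_equal_sum_common := by
  intro lst1 lst2 lst3 _
  show _ = _
  unfold sum_common sum_common_alt
  simp only [PySem.Dict.foldl_insert_getD_add_one_eq_counter, PySem.Dict.getD_counter]
  rw [b_loop_sum]
  rw [a_map_sum lst2 (fun k => (lst3.count k : Int) * k) lst1 []]
  rw [foldl_addf (fun i => i * (lst2.count i : Int) * (lst3.count i : Int)) lst1 0]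
  simp only [List.map_nil, List.sum_nil, zero_add, List.foldl_nil]
  congr 1
  apply List.map_congr_left
  intro i _
  ring
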